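-- pv_equiv track=rewrite | github.com/MEO-wj/SNCP | backend/routes/ai.py | _prefer_local_recipes_by_name
-- ===== SOURCE A (Python) =====
-- def _recipe_name_key(recipe: dict) -> str:
--     return "".join(str(recipe.get("name") or "").split()).lower()
--
-- def _prefer_local_recipes_by_name(recipes: list[dict]) -> list[dict]:
--     by_name: dict[str, dict] = {}
--     order: list[str] = []
--     for recipe in recipes:
--         key = _recipe_name_key(recipe)
--         if not key:
--             continue
--         existing_recipe = by_name.get(key)
--         if existing_recipe is None:
--             by_name[key] = recipe
--             order.append(key)
--             continue
--         if recipe.get("library_scope") == "local" and existing_recipe.get("library_scope") != "local":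
--             by_name[key] = recipe
--     return [by_name[key] for key in order]
-- ===== SOURCE B (Python) =====
-- def _recipe_name_key(recipe: dict) -> str:
--     return "".join(str(recipe.get("name") or "").split()).lower()
--
-- def _prefer_local_recipes_by_name(recipes: list[dict]) -> list[dict]:
--     # Pass 1: group recipes by normalized name key, first-appearance order.
--     groups: dict[str, list[dict]] = {}
--     for recipe in recipes:
--         key = _recipe_name_key(recipe)
--         if key:
--             groups.setdefault(key, []).append(recipe)
--     # Pass 2: per group, pick the first local recipe, else the first recipe.
--     return [
--         next((r for r in group if r.get("library_scope") == "local"), group[0])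
--         for group in groups.values()
--     ]
-- ===== Notes on version B (the rewrite author's own statement) =====
-- stated objective: alternative
-- what changed: Replaces A's single-pass incremental replacement (keep current best per key, overwrite when a local recipe beats a non-local one) by a two-phase group-then-select: first build a dict of per-key recipe groups in first-appearance order, then pick the first local recipe (else the first recipe) from each group.
import Mathlib
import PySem

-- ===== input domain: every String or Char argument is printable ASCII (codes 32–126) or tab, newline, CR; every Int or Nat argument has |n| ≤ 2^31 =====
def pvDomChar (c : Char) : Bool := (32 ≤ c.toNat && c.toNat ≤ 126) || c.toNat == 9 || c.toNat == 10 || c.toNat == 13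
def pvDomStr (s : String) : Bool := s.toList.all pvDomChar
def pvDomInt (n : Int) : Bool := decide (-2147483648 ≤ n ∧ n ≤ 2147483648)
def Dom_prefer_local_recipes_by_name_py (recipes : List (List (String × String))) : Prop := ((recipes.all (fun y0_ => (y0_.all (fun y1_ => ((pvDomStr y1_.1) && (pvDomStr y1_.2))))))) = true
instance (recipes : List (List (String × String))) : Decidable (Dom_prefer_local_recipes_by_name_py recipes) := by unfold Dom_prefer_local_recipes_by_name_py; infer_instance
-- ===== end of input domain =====

-- B replaces A's single-pass keep-or-overwrite dedup by a two-phase group-then-select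
-- (objective: alternative decomposition, same cost); return values proved equal on all inputs.

-- shared helper: recipe.get(k) on the association-list encoding of a dict (first match)
def pvRecGet (r : List (String × String)) (k : String) : Option String :=
  (PySem.Dict.mk r).get? k

-- _recipe_name_key: "".join(str(recipe.get("name") or "").split()).lower()
-- str(x or "") on an optional string is (x.getD ""): none ↦ "", some "" ↦ "", some v ↦ v.
def recipe_name_key_py (r : List (String × String)) : String :=
  PySem.Str.lower (PySem.Str.join "" (PySem.Str.split₀ ((pvRecGet r "name").getD "")))

-- recipe.get("library_scope") == "local"
def pvIsLocal (r : List (String × String)) : Bool :=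
  pvRecGet r "library_scope" == some "local"

-- ===== PORT A =====
def pvAStep (st : PySem.Dict String (List (String × String)) × List String)
    (recipe : List (String × String)) :
    PySem.Dict String (List (String × String)) × List String :=
  let key := recipe_name_key_py recipe
  if key = "" then st
  else
    match st.1.get? key with
    | none => (st.1.insert key recipe, st.2 ++ [key])
    | some existing_recipe =>
        if pvIsLocal recipe && !(pvIsLocal existing_recipe) then (st.1.insert key recipe, st.2)
        else st

def prefer_local_recipes_by_name_py (recipes : List (List (String × String))) :
    List (List (String × String)) :=
  let st := recipes.foldl pvAStep (PySem.Dict.empty, [])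
  -- by_name[key] for key ∈ order: the key is always present, so getD [] is exact
  st.2.map (fun k => st.1.getD k [])

-- ===== PORT B =====
-- next((r for r in group if r.get("library_scope") == "local"), group[0]);
-- groups never hold an empty list, so headD [] is exact for group[0]
def pvSelect (g : List (List (String × String))) : List (String × String) :=
  ((g.find? (fun r => pvIsLocal r)).getD (g.headD []))

def pvBStep (groups : PySem.Dict String (List (List (String × String))))
    (recipe : List (String × String)) :
    PySem.Dict String (List (List (String × String))) :=
  let key := recipe_name_key_py recipe
  if key = "" then groups
  else groups.modify key [] (· ++ [recipe])   -- setdefault(key, []).append(recipe)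

def prefer_local_recipes_by_name_py_alt (recipes : List (List (String × String))) :
    List (List (String × String)) :=
  ((recipes.foldl pvBStep PySem.Dict.empty).values).map pvSelect

-- ===== PRECONDITION & SPEC =====
def Spec_prefer_local_recipes_by_name_py (recipes : List (List (String × String))) (out : List (List (String × String))) : Prop := out = prefer_local_recipes_by_name_py_alt recipes
instance (recipes : List (List (String × String))) (out : List (List (String × String))) : Decidable (Spec_prefer_local_recipes_by_name_py recipes out) := by unfold Spec_prefer_local_recipes_by_name_py; infer_instance

-- ===== CLAIM (what is proved, stated in full; the proofs are below) =====
def Claim_equal_prefer_local_recipes_by_name_py : Prop := ∀ (recipes : List (List (String × String))), Dom_prefer_local_recipes_by_name_py recipes → Spec_prefer_local_recipes_by_name_py recipes (prefer_local_recipes_by_name_py recipes)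

-- ===== LEMMAS AND PROOFS =====

theorem pvSelect_singleton (r : List (String × String)) : pvSelect [r] = r := by
  simp [pvSelect, List.find?]
  cases h : pvIsLocal r <;> simp

-- selection commutes with appending one recipe, matching A's replacement condition
theorem pvSelect_append (g : List (List (String × String))) (r : List (String × String))
    (hg : g ≠ []) :
    pvSelect (g ++ [r]) =
      if pvIsLocal r && !(pvIsLocal (pvSelect g)) then r else pvSelect g := by
  cases hf : g.find? (fun r => pvIsLocal r) with
  | some m =>
      have hm : pvIsLocal m = true := by simpa using List.find?_some hf
      simp [pvSelect, List.find?_append, hf, hm]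
  | none =>
      obtain ⟨a, t, rfl⟩ := List.exists_cons_of_ne_nil hg
      have hha : pvIsLocal a = false := by
        simpa using List.find?_eq_none.mp hf a (by simp)
      have hft : t.find? (fun r => pvIsLocal r) = none :=
        List.find?_eq_none.mpr (fun x hx => List.find?_eq_none.mp hf x (by simp [hx]))
      cases hr : pvIsLocal r <;>
        simp [pvSelect, List.find?_append, List.find?, hha, hft, hr]

-- the loop invariant: A's (by_name, order) and B's groups stay related through the folds
theorem pv_inv_fold (rest : List (List (String × String)))
    (dA : PySem.Dict String (List (String × String))) (ord : List String)
    (dB : PySem.Dict String (List (List (String × String))))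
    (hord : ord = dB.keys) (hnd : dB.keys.Nodup)
    (hval : ∀ k, dA.get? k = (dB.get? k).map pvSelect)
    (hne : ∀ k g, dB.get? k = some g → g ≠ []) :
    (rest.foldl pvAStep (dA, ord)).2 = (rest.foldl pvBStep dB).keys ∧
    (rest.foldl pvBStep dB).keys.Nodup ∧
    (∀ k, (rest.foldl pvAStep (dA, ord)).1.get? k
        = ((rest.foldl pvBStep dB).get? k).map pvSelect) ∧
    (∀ k g, (rest.foldl pvBStep dB).get? k = some g → g ≠ []) := by
  induction rest generalizing dA ord dB with
  | nil => exact ⟨hord, hnd, hval, hne⟩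
  | cons r rest ih =>
      simp only [List.foldl_cons]
      by_cases hkey : recipe_name_key_py r = ""
      · rw [show pvAStep (dA, ord) r = (dA, ord) from by simp [pvAStep, hkey],
            show pvBStep dB r = dB from by simp [pvBStep, hkey]]
        exact ih dA ord dB hord hnd hval hne
      · cases hA : dA.get? (recipe_name_key_py r) with
        | none =>
            have hB : dB.get? (recipe_name_key_py r) = none := by
              have h := hval (recipe_name_key_py r)
              rw [hA] at h
              cases h' : dB.get? (recipe_name_key_py r) with
              | none => rfl
              | some g => rw [h'] at h; simp at h
            have hnc : dB.contains (recipe_name_key_py r) = false := by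
              rw [PySem.Dict.contains_eq_isSome_get?, hB]; rfl
            have hnotmem : recipe_name_key_py r ∉ dB.keys :=
              (PySem.Dict.get?_eq_none_iff_not_mem_keys _ _).mp hB
            rw [show pvAStep (dA, ord) r
                  = (dA.insert (recipe_name_key_py r) r, ord ++ [recipe_name_key_py r]) from by
                simp [pvAStep, hkey, hA],
              show pvBStep dB r = dB.insert (recipe_name_key_py r) [r] from by
                simp [pvBStep, hkey, PySem.Dict.modify,
                  PySem.Dict.getD_of_get?_eq_none _ _ hB]]
            apply ih
            · rw [hord, PySem.Dict.keys_insert_of_not_contains _ _ hnc]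
            · exact PySem.Dict.nodup_keys_insert _ _ _ hnd
            · intro k
              by_cases hk : k = recipe_name_key_py r
              · subst hk
                rw [PySem.Dict.get?_insert_self, PySem.Dict.get?_insert_self]
                simp [pvSelect_singleton]
              · rw [PySem.Dict.get?_insert_of_ne _ _ hk,
                    PySem.Dict.get?_insert_of_ne _ _ hk]
                exact hval k
            · intro k g hkg
              by_cases hk : k = recipe_name_key_py r
              · subst hk
                rw [PySem.Dict.get?_insert_self] at hkg
                simp at hkg; subst hkg; simp
              · rw [PySem.Dict.get?_insert_of_ne _ _ hk] at hkg
                exact hne k g hkg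
        | some ex =>
            obtain ⟨g, hBg, hex⟩ :
                ∃ g, dB.get? (recipe_name_key_py r) = some g ∧ ex = pvSelect g := by
              have h := hval (recipe_name_key_py r)
              rw [hA] at h
              cases h' : dB.get? (recipe_name_key_py r) with
              | none => rw [h'] at h; simp at h
              | some g => rw [h'] at h; simp at h; exact ⟨g, rfl, h⟩
            have hgne : g ≠ [] := hne _ g hBg
            have hc : dB.contains (recipe_name_key_py r) = true := by
              rw [PySem.Dict.contains_eq_isSome_get?, hBg]; rfl
            have hBstep : pvBStep dB r
                = dB.insert (recipe_name_key_py r) (g ++ [r]) := by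
              simp [pvBStep, hkey, PySem.Dict.modify,
                PySem.Dict.getD_of_get?_eq_some _ _ hBg]
            have hsel := pvSelect_append g r hgne
            by_cases hcond : (pvIsLocal r && !(pvIsLocal ex)) = true
            · have hsel' : pvSelect (g ++ [r]) = r := by rw [hsel, hex] at *; simp [hcond]
              rw [show pvAStep (dA, ord) r
                    = (dA.insert (recipe_name_key_py r) r, ord) from by
                  simp [pvAStep, hkey, hA, hcond], hBstep]
              apply ih
              · rw [hord, PySem.Dict.keys_insert_of_contains _ _ hc]
              · rw [PySem.Dict.keys_insert_of_contains _ _ hc]; exact hnd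
              · intro k
                by_cases hk : k = recipe_name_key_py r
                · subst hk
                  rw [PySem.Dict.get?_insert_self, PySem.Dict.get?_insert_self]
                  simp [hsel']
                · rw [PySem.Dict.get?_insert_of_ne _ _ hk,
                      PySem.Dict.get?_insert_of_ne _ _ hk]
                  exact hval k
              · intro k gg hkg
                by_cases hk : k = recipe_name_key_py r
                · subst hk
                  rw [PySem.Dict.get?_insert_self] at hkg
                  simp at hkg; subst hkg; simp
                · rw [PySem.Dict.get?_insert_of_ne _ _ hk] at hkg
                  exact hne k gg hkg
            · have hsel' : pvSelect (g ++ [r]) = ex := by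
                rw [hsel, ← hex, if_neg hcond]
              rw [show pvAStep (dA, ord) r = (dA, ord) from by
                  simp only [pvAStep, hA, Bool.not_eq_true] at *
                  simp [hkey, hcond], hBstep]
              apply ih
              · rw [hord, PySem.Dict.keys_insert_of_contains _ _ hc]
              · rw [PySem.Dict.keys_insert_of_contains _ _ hc]; exact hnd
              · intro k
                by_cases hk : k = recipe_name_key_py r
                · subst hk
                  rw [PySem.Dict.get?_insert_self, hA]
                  simp [hsel']
                · rw [PySem.Dict.get?_insert_of_ne _ _ hk]
                  exact hval k
              · intro k gg hkg
                by_cases hk : k = recipe_name_key_py r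
                · subst hk
                  rw [PySem.Dict.get?_insert_self] at hkg
                  simp at hkg; subst hkg; simp
                · rw [PySem.Dict.get?_insert_of_ne _ _ hk] at hkg
                  exact hne k gg hkg

-- ===== VERDICT (by name: the statement is the Claim_ definition above) =====
theorem prefer_local_recipes_by_name_py_spec : Claim_equal_prefer_local_recipes_by_name_py := by
  intro recipes _
  unfold Spec_prefer_local_recipes_by_name_py
  show List.map (fun k => (List.foldl pvAStep (PySem.Dict.empty, []) recipes).1.getD k [])
      (List.foldl pvAStep (PySem.Dict.empty, []) recipes).2
    = prefer_local_recipes_by_name_py_alt recipes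
  unfold prefer_local_recipes_by_name_py_alt
  obtain ⟨h1, h2, h3, h4⟩ := pv_inv_fold recipes PySem.Dict.empty [] PySem.Dict.empty
    (by simp) (by simp) (by intro k; simp) (by intro k g h; simp at h)
  rw [PySem.Dict.values_eq_map_keys _ h2 [], List.map_map, h1]
  apply List.map_congr_left
  intro k hk
  have hB : ∃ g, ((recipes.foldl pvBStep PySem.Dict.empty).get? k) = some g := by
    cases h' : (recipes.foldl pvBStep PySem.Dict.empty).get? k with
    | none =>
        exact absurd ((PySem.Dict.get?_eq_none_iff_not_mem_keys _ _).mp h') (by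
          rw [← h1] at hk; rw [← h1]; exact fun hn => hn hk)
    | some g => exact ⟨g, rfl⟩
  obtain ⟨g, hg⟩ := hB
  have hAk := h3 k
  rw [hg] at hAk
  simp only [Option.map_some] at hAk
  rw [PySem.Dict.getD_of_get?_eq_some _ _ hAk]
  simp only [Function.comp_apply]
  rw [PySem.Dict.getD_of_get?_eq_some _ _ hg]
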